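-- pv_equiv track=rewrite | github.com/PermutaTriangle/Permuta | permuta/Permutations.py | in_L2
-- ===== SOURCE A (Python) =====
-- def in_L2(L):
--     n = len(L)
--     if n == 0 or n == 1:
--         return True
--     if L[-1] == n:
--         return in_L2(L[0:n-1])
--     elif L[-1] == n-1 and L[-2] == n:
--         return in_L2(L[0:n-2])
--     else:
--         return False
-- ===== SOURCE B (Python) =====
-- def in_L2(L):
--     k = len(L)
--     while k >= 2:
--         if L[k - 1] == k:
--             k -= 1
--         elif L[k - 1] == k - 1 and L[k - 2] == k:
--             k -= 2
--         else:
--             return False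
--     return True
-- ===== Notes on version B (the rewrite author's own statement) =====
-- stated objective: alternative
-- what changed: Replaced the recursive-with-slicing check by an iterative loop that walks an index pointer down from the end, making no prefix copies and using no recursion.
import Mathlib
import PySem

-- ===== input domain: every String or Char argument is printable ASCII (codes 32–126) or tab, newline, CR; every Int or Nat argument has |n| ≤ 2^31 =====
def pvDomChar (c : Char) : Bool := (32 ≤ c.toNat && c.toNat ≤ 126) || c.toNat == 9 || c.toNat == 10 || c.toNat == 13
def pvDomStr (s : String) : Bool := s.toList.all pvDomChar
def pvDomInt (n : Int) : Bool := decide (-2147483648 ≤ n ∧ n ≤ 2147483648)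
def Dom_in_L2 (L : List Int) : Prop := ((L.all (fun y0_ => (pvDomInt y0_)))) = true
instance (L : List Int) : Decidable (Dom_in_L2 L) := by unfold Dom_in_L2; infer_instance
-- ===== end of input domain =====

-- B replaces A's recursion-with-slicing by an iterative index pointer walking down from the end (no prefix copies); return values agree everywhere.
-- ===== PORT A =====
def in_L2 (L : List Int) : Bool :=
  let n := L.length
  if h : n = 0 ∨ n = 1 then true
  else if PySem.List.pyGetD L (-1) 0 = (n : Int) then
    in_L2 (PySem.List.slice L (some 0) (some ((n : Int) - 1)))
  else if PySem.List.pyGetD L (-1) 0 = (n : Int) - 1 ∧ PySem.List.pyGetD L (-2) 0 = (n : Int) then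
    in_L2 (PySem.List.slice L (some 0) (some ((n : Int) - 2)))
  else false
termination_by L.length
decreasing_by
  · rw [show ((L.length : Int) - 1) = ((L.length - 1 : Nat) : Int) by omega,
      PySem.List.slice_zero_start, PySem.List.slice_to_natCast]
    simp [List.length_take]; omega
  · rw [show ((L.length : Int) - 2) = ((L.length - 2 : Nat) : Int) by omega,
      PySem.List.slice_zero_start, PySem.List.slice_to_natCast]
    simp [List.length_take]; omega

-- ===== PORT B =====
-- the while loop over the pointer k, as structural recursion on k
def in_L2_go (L : List Int) : Nat → Bool
  | 0 => true
  | 1 => true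
  | k + 2 =>
    if L.getD (k + 1) 0 = (k : Int) + 2 then in_L2_go L (k + 1)
    else if L.getD (k + 1) 0 = (k : Int) + 1 ∧ L.getD k 0 = (k : Int) + 2 then in_L2_go L k
    else false

def in_L2_alt (L : List Int) : Bool := in_L2_go L L.length

-- ===== PRECONDITION & SPEC =====
def Spec_in_L2 (L : List Int) (out : Bool) : Prop := out = in_L2_alt L
instance (L : List Int) (out : Bool) : Decidable (Spec_in_L2 L out) := by unfold Spec_in_L2; infer_instance

-- ===== CLAIM (what is proved, stated in full; the proofs are below) =====
def Claim_equal_in_L2 : Prop := ∀ (L : List Int), Dom_in_L2 L → Spec_in_L2 L (in_L2 L)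

-- ===== LEMMAS AND PROOFS =====

-- ===== VERDICT (by name: the statement is the Claim_ definition above) =====
lemma in_L2_take_eq_go (L : List Int) : ∀ k, k ≤ L.length → in_L2 (L.take k) = in_L2_go L k := by
  intro k
  induction k using Nat.strong_induction_on with
  | _ k ih =>
    match k with
    | 0 => intro _; rw [in_L2]; simp [in_L2_go]
    | 1 =>
      intro h
      rw [in_L2]
      simp [in_L2_go, List.length_take, Nat.min_eq_left h]
    | m + 2 =>
      intro h
      have hlt : m + 1 < L.length := by omega
      have hm : m < L.length := by omega
      have hlen : (L.take (m + 2)).length = m + 2 := by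
        simp [List.length_take]; omega
      rw [in_L2]
      simp only [hlen]
      have hget1 : PySem.List.pyGetD (L.take (m + 2)) (-1) 0 = L[m + 1] := by
        rw [PySem.List.pyGetD_neg_ofNat _ 1 _ (by omega) (by omega)]
        simp [hlen, List.getElem_take]
      have hget2 : PySem.List.pyGetD (L.take (m + 2)) (-2) 0 = L[m] := by
        rw [PySem.List.pyGetD_neg_ofNat _ 2 _ (by omega) (by omega)]
        simp [hlen, List.getElem_take]
      have hs1 : PySem.List.slice (L.take (m + 2)) (some 0) (some ((↑(m + 2) : Int) - 1))
          = L.take (m + 1) := by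
        rw [show ((↑(m + 2) : Int) - 1) = ((m + 1 : Nat) : Int) by push_cast; ring,
          PySem.List.slice_zero_start, PySem.List.slice_to_natCast, List.take_take]
        simp
      have hs2 : PySem.List.slice (L.take (m + 2)) (some 0) (some ((↑(m + 2) : Int) - 2))
          = L.take m := by
        rw [show ((↑(m + 2) : Int) - 2) = ((m : Nat) : Int) by push_cast; ring,
          PySem.List.slice_zero_start, PySem.List.slice_to_natCast, List.take_take]
        simp
      have hgd1 : L.getD (m + 1) 0 = L[m + 1] := List.getD_eq_getElem L 0 hlt
      have hgd2 : L.getD m 0 = L[m] := List.getD_eq_getElem L 0 hm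
      simp only [hget1, hget2, hs1, hs2, in_L2_go, hgd1, hgd2]
      have h1 := ih (m + 1) (by omega) (by omega)
      have h2 := ih m (by omega) (by omega)
      simp only [h1, h2]
      push_cast
      rw [show ((m : Int) + 2 - 1) = (m : Int) + 1 from by ring]
      simp

-- ===== VERDICT (by name: the statement is the Claim_ definition above) =====
theorem in_L2_spec : Claim_equal_in_L2 := by
  intro L _
  unfold Spec_in_L2 in_L2_alt
  rw [← List.take_length (l := L), in_L2_take_eq_go L L.length le_rfl]
  simp
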